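-- pv_equiv track=rewrite | github.com/maddukurivenkat451/XMLParssingInPython | XmlParser.py | dictify_key_pairs
-- ===== SOURCE A (Python) =====
-- from collections import defaultdict
--
-- def dictify_key_pairs(pairs, key_sep='-'):
--     """
--     Dictify key pairs from flatten_xml, taking care of duplicate keys.
--     """
--     out = {}
--
--     # Group by candidate key.
--     key_map = defaultdict(list)
--     for key_parts, value in pairs:
--         key_map[key_sep.join(key_parts)].append(value)
--
--     # Figure out the final dict with suffixes if required.
--     for key, values in key_map.items():
--         if len(values) == 1:  # No need to suffix keys.
--             out[key] = values[0]
--         else:  # More than one value for this key.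
--             for suffix, value in enumerate(values, 1):
--                 out[f'{key}{key_sep}{suffix}'] = value
--
--     return out
-- ===== SOURCE B (Python) =====
-- def dictify_key_pairs(pairs, key_sep='-'):
--     """
--     Dictify key pairs from flatten_xml, taking care of duplicate keys.
--
--     Dict-free partition approach: repeatedly take the first remaining pair's
--     joined key, pull out all values sharing it, emit the (suffixed) items,
--     and continue with the pairs whose key differs.
--     """
--     items = []
--     rest = list(pairs)
--     while rest:
--         key = key_sep.join(rest[0][0])
--         same = [value for key_parts, value in rest if key_sep.join(key_parts) == key]
--         if len(same) == 1:
--             items.append((key, same[0]))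
--         else:
--             items.extend((f'{key}{key_sep}{i}', value) for i, value in enumerate(same, 1))
--         rest = [(key_parts, value) for key_parts, value in rest[1:]
--                 if key_sep.join(key_parts) != key]
--     return dict(items)
-- ===== Notes on version B (the rewrite author's own statement) =====
-- stated objective: alternative
-- what changed: Replaces the defaultdict grouping pass plus items() walk by a dict-free partition loop that repeatedly extracts all pairs sharing the first remaining joined key, emits their (suffixed) items directly, and recurses on the rest.
import Mathlib
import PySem

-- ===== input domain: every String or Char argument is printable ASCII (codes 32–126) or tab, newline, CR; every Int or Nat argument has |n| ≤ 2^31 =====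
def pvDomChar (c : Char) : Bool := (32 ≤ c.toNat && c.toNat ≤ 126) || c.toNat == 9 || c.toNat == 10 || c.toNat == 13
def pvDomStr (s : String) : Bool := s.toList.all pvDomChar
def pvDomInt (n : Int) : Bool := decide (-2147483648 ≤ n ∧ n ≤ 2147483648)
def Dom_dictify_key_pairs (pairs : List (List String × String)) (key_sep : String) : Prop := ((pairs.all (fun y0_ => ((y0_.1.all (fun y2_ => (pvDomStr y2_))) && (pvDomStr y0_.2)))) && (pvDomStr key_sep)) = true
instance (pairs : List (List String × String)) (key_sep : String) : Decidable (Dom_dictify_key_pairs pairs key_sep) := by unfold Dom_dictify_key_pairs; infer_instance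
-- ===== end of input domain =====

-- B replaces A's defaultdict-grouping pass + items() walk by a dict-free partition loop
-- (extract all pairs sharing the first remaining joined key, emit their items, continue
-- with the rest); objective: alternative decomposition, same results.

-- ===== PORT A =====
def dictify_key_pairs (pairs : List (List String × String)) (key_sep : String) : List (String × String) :=
  -- key_map = defaultdict(list); for key_parts, value in pairs: key_map[join].append(value)
  let key_map : PySem.Dict String (List String) :=
    pairs.foldl (fun m p => m.modify (PySem.Str.join key_sep p.1) [] (fun vs => vs ++ [p.2]))
      PySem.Dict.empty
  -- for key, values in key_map.items(): …  (values[0] is safe: every group is nonempty,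
  -- so the pyGetD default "" is unreachable)
  let out : PySem.Dict String String :=
    key_map.items.foldl (fun out kv =>
      if kv.2.length == 1 then
        out.insert kv.1 (PySem.List.pyGetD kv.2 0 "")
      else
        (PySem.List.enumerate kv.2 1).foldl
          (fun out sv => out.insert (kv.1 ++ key_sep ++ PySem.Int.toStr sv.1) sv.2) out)
      PySem.Dict.empty
  out.items

-- ===== PORT B =====
-- the while-loop of Source B: state `rest`, strictly shrinking; the Nat argument is fuel
-- (initially rest.length, never exhausted since each round shortens rest) so the
-- recursion is structural
def dkpGo (key_sep : String) : Nat → List (List String × String) → List (String × String)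
  | _, [] => []
  | 0, _ :: _ => []
  | n + 1, (kp, v) :: rest =>
    let key := PySem.Str.join key_sep kp
    let same := (((kp, v) :: rest).filter (fun q => PySem.Str.join key_sep q.1 == key)).map
      (fun q => q.2)
    let items := if same.length == 1 then [(key, PySem.List.pyGetD same 0 "")]
      else (PySem.List.enumerate same 1).map
        (fun sv => (key ++ key_sep ++ PySem.Int.toStr sv.1, sv.2))
    items ++ dkpGo key_sep n (rest.filter (fun q => !(PySem.Str.join key_sep q.1 == key)))

def dictify_key_pairs_alt (pairs : List (List String × String)) (key_sep : String) : List (String × String) :=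
  (PySem.Dict.ofList (dkpGo key_sep pairs.length pairs)).items

-- ===== PRECONDITION & SPEC =====
def Spec_dictify_key_pairs (pairs : List (List String × String)) (key_sep : String) (out : List (String × String)) : Prop := out = dictify_key_pairs_alt pairs key_sep
instance (pairs : List (List String × String)) (key_sep : String) (out : List (String × String)) : Decidable (Spec_dictify_key_pairs pairs key_sep out) := by unfold Spec_dictify_key_pairs; infer_instance

-- ===== CLAIM (what is proved, stated in full; the proofs are below) =====
def Claim_equal_dictify_key_pairs : Prop := ∀ (pairs : List (List String × String)) (key_sep : String), Dom_dictify_key_pairs pairs key_sep → Spec_dictify_key_pairs pairs key_sep (dictify_key_pairs pairs key_sep)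

-- ===== LEMMAS AND PROOFS =====

-- joined key of a pair, values grouped under a key, items emitted for a group
def pvJK (key_sep : String) (q : List String × String) : String := PySem.Str.join key_sep q.1
def pvVals (key_sep : String) (pairs : List (List String × String)) (k : String) : List String :=
  (pairs.filter (fun q => pvJK key_sep q == k)).map (fun q => q.2)
def pvItems (key_sep k : String) (vs : List String) : List (String × String) :=
  if vs.length == 1 then [(k, PySem.List.pyGetD vs 0 "")]
  else (PySem.List.enumerate vs 1).map (fun sv => (k ++ key_sep ++ PySem.Int.toStr sv.1, sv.2))

-- Set.add facts specialised to the shapes we need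
lemma pvFoldl_add_filter (l : List String) (s : List String) (a : String)
    (ha : a ∈ s) :
    List.foldl PySem.Set.add s l = List.foldl PySem.Set.add s (l.filter (fun x => !(x == a))) := by
  induction l generalizing s with
  | nil => rfl
  | cons x t ih =>
    by_cases hx : x = a
    · subst hx
      have hadd : PySem.Set.add s x = s := by
        simp [PySem.Set.add, PySem.Set.contains, ha]
      simp [hadd, ih s ha]
    · have hmem : a ∈ PySem.Set.add s x := by
        simp [PySem.Set.add]
        split <;> simp [ha]
      simp [hx, ih _ hmem]

lemma pvFoldl_add_cons (l : List String) (s : List String) (a : String)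
    (hl : a ∉ l) :
    List.foldl PySem.Set.add (a :: s) l = a :: List.foldl PySem.Set.add s l := by
  induction l generalizing s with
  | nil => rfl
  | cons x t ih =>
    have hxa : ¬ (x = a) := fun h => hl (h ▸ List.mem_cons_self ..)
    have hadd : PySem.Set.add (a :: s) x = a :: PySem.Set.add s x := by
      simp [PySem.Set.add, PySem.Set.contains, hxa]
      split <;> simp
    simp only [List.foldl_cons, hadd, ih _ (fun h => hl (List.mem_cons_of_mem _ h))]

lemma pvOfList_cons (a : String) (l : List String) :
    PySem.Set.ofList (a :: l) = a :: PySem.Set.ofList (l.filter (fun x => !(x == a))) := by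
  have h0 : PySem.Set.add ([] : List String) a = [a] := by rfl
  have hnot : a ∉ l.filter (fun x => !(x == a)) := by
    intro h
    simp [List.mem_filter] at h
  rw [PySem.Set.ofList_eq_foldl, PySem.Set.ofList_eq_foldl, List.foldl_cons, h0,
    pvFoldl_add_filter l [a] a (List.mem_singleton.mpr rfl)]
  exact pvFoldl_add_cons _ [] a hnot

-- A's grouping dict, characterised: items = distinct joined keys (first-occurrence
-- order), each with the values of its pairs in order
lemma pvKeyMap_items (pairs : List (List String × String)) (key_sep : String) :
    (pairs.foldl (fun m p => m.modify (PySem.Str.join key_sep p.1) [] (fun vs => vs ++ [p.2]))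
      (PySem.Dict.empty : PySem.Dict String (List String))).items
    = (PySem.Set.ofList (pairs.map (pvJK key_sep))).map
        (fun k => (k, pvVals key_sep pairs k)) := by
  set d := pairs.foldl (fun m p => m.modify (PySem.Str.join key_sep p.1) [] (fun vs => vs ++ [p.2]))
      (PySem.Dict.empty : PySem.Dict String (List String)) with hd
  have hd2 : d = pairs.foldl (fun m p => m.modify (pvJK key_sep p) [] (fun vs => vs ++ [p.2]))
      PySem.Dict.empty := hd
  have hkeys : d.keys = PySem.Set.ofList (pairs.map (pvJK key_sep)) := by
    rw [hd2, PySem.Dict.keys_foldl_modify_key pairs (pvJK key_sep) []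
      (fun _ p => fun vs => vs ++ [p.2]) PySem.Dict.empty]
    simp [PySem.Set.update, PySem.Set.ofList_eq_foldl, PySem.Dict.keys_empty]
  have hnd : d.keys.Nodup := by
    rw [hd]
    exact PySem.Dict.nodup_keys_foldl_modify_key pairs (pvJK key_sep) []
      (fun _ p => fun vs => vs ++ [p.2]) PySem.Dict.empty (by simp [PySem.Dict.keys_empty])
  have hgetD : ∀ c, d.getD c [] = pvVals key_sep pairs c := by
    intro c
    have hfold : d = (pairs.map (fun p => (pvJK key_sep p, p.2))).foldl
        (fun m q => m.modify q.1 [] (fun vs => vs ++ [q.2])) PySem.Dict.empty := by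
      rw [hd, List.foldl_map]
      rfl
    rw [hfold, PySem.Dict.getD_foldl_modify_append, PySem.Dict.getD_empty, List.filter_map]
    simp [pvVals, List.map_map, Function.comp_def]
  rw [PySem.Dict.items_eq_map_keys d hnd [], hkeys]
  exact List.map_congr_left (fun k _ => by rw [hgetD k])

-- A's second loop, flattened to one insert per emitted item
lemma pvOutFold (key_sep : String) (gs : List (String × List String))
    (d : PySem.Dict String String) :
    gs.foldl (fun out kv =>
      if kv.2.length == 1 then out.insert kv.1 (PySem.List.pyGetD kv.2 0 "")
      else (PySem.List.enumerate kv.2 1).foldl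
        (fun out sv => out.insert (kv.1 ++ key_sep ++ PySem.Int.toStr sv.1) sv.2) out) d
    = (gs.flatMap (fun g => pvItems key_sep g.1 g.2)).foldl
        (fun d q => d.insert q.1 q.2) d := by
  induction gs generalizing d with
  | nil => rfl
  | cons g t ih =>
    rw [List.foldl_cons, List.flatMap_cons, List.foldl_append, ih]
    congr 1
    by_cases h : (g.2.length == 1) = true
    · simp [pvItems, h]
    · simp only [pvItems, h]
      simp [List.foldl_map]

-- B's loop produces exactly the flattened grouped items, group by group
lemma pvGo_eq (key_sep : String) : ∀ (n : Nat) (pairs : List (List String × String)),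
    pairs.length ≤ n →
    dkpGo key_sep n pairs
    = (PySem.Set.ofList (pairs.map (pvJK key_sep))).flatMap
        (fun k => pvItems key_sep k (pvVals key_sep pairs k)) := by
  intro n
  induction n with
  | zero =>
    intro pairs h
    obtain rfl : pairs = [] := List.eq_nil_of_length_eq_zero (Nat.le_zero.mp h)
    rfl
  | succ n ih =>
    intro pairs h
    match pairs with
    | [] => rfl
    | (kp, v) :: rest =>
      rw [dkpGo]
      set k0 := PySem.Str.join key_sep kp with hk0
      set other := rest.filter (fun q => !(PySem.Str.join key_sep q.1 == k0)) with hother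
      have hlen : other.length ≤ n := by
        rw [hother]
        exact le_trans (List.length_filter_le _ _)
          (Nat.succ_le_succ_iff.mp (by simpa using h))
      have hIH := ih other hlen
      have hset : PySem.Set.ofList (((kp, v) :: rest).map (pvJK key_sep))
          = k0 :: PySem.Set.ofList (other.map (pvJK key_sep)) := by
        rw [show ((kp, v) :: rest).map (pvJK key_sep) = k0 :: rest.map (pvJK key_sep) from rfl,
          pvOfList_cons, hother, List.filter_map]
        rfl
      rw [hset, List.flatMap_cons, hIH]
      -- head items agree definitionally; rewrite the tail's value lists
      congr 1
      rw [List.flatMap_def, List.flatMap_def]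
      refine congrArg List.flatten (List.map_congr_left (fun k hk => ?_))
      have hk' : k ∈ other.map (pvJK key_sep) :=
        (PySem.Set.mem_ofList _ k).mp hk
      have hkne : k ≠ k0 := by
        rcases List.mem_map.mp hk' with ⟨q, hq, rfl⟩
        rcases List.mem_filter.mp hq with ⟨-, hq2⟩
        simpa [pvJK] using hq2
      have hvals : pvVals key_sep other k = pvVals key_sep ((kp, v) :: rest) k := by
        unfold pvVals pvJK
        rw [hother, List.filter_cons_of_neg
          (by simp only [beq_iff_eq]; exact fun h => hkne h.symm)]
        congr 1
        simp only [List.filter_filter]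
        refine List.filter_congr (fun q _ => ?_)
        by_cases h : PySem.Str.join key_sep q.1 = k
        · simp [h, hkne]
        · simp [h]
      rw [hvals]

-- ===== VERDICT (by name: the statement is the Claim_ definition above) =====
theorem dictify_key_pairs_spec : Claim_equal_dictify_key_pairs := by
  intro pairs key_sep _
  show dictify_key_pairs pairs key_sep = dictify_key_pairs_alt pairs key_sep
  rw [dictify_key_pairs, dictify_key_pairs_alt]
  show (_ : PySem.Dict String String).items = _
  rw [pvOutFold, pvKeyMap_items, List.flatMap_map, pvGo_eq key_sep pairs.length pairs le_rfl]
  rfl
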